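-- pv_equiv track=rewrite | github.com/Dheebz/advent-of-code | src/python/year_2022/solution_2022_day_22.py | wrap_flat
-- ===== SOURCE A (Python) =====
-- from typing import Dict, List, Tuple
--
-- Facing = int  # 0=right,1=down,2=left,3=up
--
-- def wrap_flat(board: List[str], x: int, y: int, facing: Facing) -> Tuple[int, int]:
--     """Wrap on the flat map for part 1."""
--     if facing == 0:  # right
--         nx = next(i for i, ch in enumerate(board[y]) if ch != " ")
--         return nx, y
--     if facing == 2:  # left
--         nx = max(i for i, ch in enumerate(board[y]) if ch != " ")
--         return nx, y
--     if facing == 1:  # down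
--         ny = next(i for i, row in enumerate(board) if len(row) > x and row[x] != " ")
--         return x, ny
--     # up
--     ny = max(i for i, row in enumerate(board) if len(row) > x and row[x] != " ")
--     return x, ny
-- ===== SOURCE B (Python) =====
-- def wrap_flat(board, x, y, facing):
--     """Wrap via strip arithmetic: render the travel line as a string, compute the
--     boundary offset from stripped-length bookkeeping (no scan for first/last match),
--     then map it back through an index list."""
--     if facing in (0, 2):
--         line = board[y]
--         idxs = range(len(line))
--     else:
--         idxs = [i for i, row in enumerate(board) if len(row) > x]
--         line = "".join(board[i][x] for i in idxs)
--     if facing in (0, 1):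
--         k = len(line) - len(line.lstrip(" "))
--     else:
--         k = len(line.rstrip(" ")) - 1
--     pos = idxs[k]
--     return (pos, y) if facing in (0, 2) else (x, pos)
-- ===== Notes on version B (the rewrite author's own statement) =====
-- stated objective: alternative
-- what changed: Instead of scanning for the first/last non-space cell (next/max over a generator per facing), B renders the travel line as a string plus a parallel index list, computes the boundary offset arithmetically from lstrip/rstrip stripped lengths, and indexes the index list with it.
-- outside the precondition, e.g. on wrap_flat([' #', ''], -1, 0, 1): A returns (-1, 0), B raises IndexError
import Mathlib
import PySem

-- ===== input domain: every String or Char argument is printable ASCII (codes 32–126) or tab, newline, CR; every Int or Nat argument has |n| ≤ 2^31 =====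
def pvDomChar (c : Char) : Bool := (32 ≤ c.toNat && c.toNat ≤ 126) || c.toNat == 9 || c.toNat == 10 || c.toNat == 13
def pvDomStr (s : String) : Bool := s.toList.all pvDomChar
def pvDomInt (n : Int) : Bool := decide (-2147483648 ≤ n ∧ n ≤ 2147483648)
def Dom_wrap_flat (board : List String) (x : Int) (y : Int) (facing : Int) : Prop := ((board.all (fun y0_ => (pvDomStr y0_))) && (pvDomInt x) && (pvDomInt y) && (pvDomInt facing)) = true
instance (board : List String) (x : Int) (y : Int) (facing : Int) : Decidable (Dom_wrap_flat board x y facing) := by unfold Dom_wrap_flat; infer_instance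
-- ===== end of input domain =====

-- B replaces A's per-facing first/last scans by strip-length arithmetic on the travel line
-- plus an index list (objective: alternative); return-value equivalence on Pre_wrap_flat is what is proved.

-- ===== PORT A =====
-- row[x] where Python would raise IndexError is ported as getD ' ' (a space, hence skipped);
-- that is only reachable outside Pre_wrap_flat.
def wrap_flat (board : List String) (x : Int) (y : Int) (facing : Int) : Int × Int :=
  if facing = 0 then
    let row := ((PySem.List.pyGet? board y).getD "").toList
    let nx := (((PySem.List.enumerate row).find? (fun p => p.2 != ' ')).map (·.1)).getD 0  -- none = StopIteration
    (nx, y)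
  else if facing = 2 then
    let row := ((PySem.List.pyGet? board y).getD "").toList
    let nx := (PySem.List.max? (((PySem.List.enumerate row).filter (fun p => p.2 != ' ')).map (·.1)) (fun i => i)).getD 0  -- none = ValueError
    (nx, y)
  else if facing = 1 then
    let ny := (((PySem.List.enumerate board).find?
        (fun p => decide (x < PySem.Str.len p.2) && ((PySem.Str.pyGet? p.2 x).getD ' ' != ' '))).map (·.1)).getD 0
    (x, ny)
  else
    let ny := (PySem.List.max? (((PySem.List.enumerate board).filter
        (fun p => decide (x < PySem.Str.len p.2) && ((PySem.Str.pyGet? p.2 x).getD ' ' != ' '))).map (·.1)) (fun i => i)).getD 0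
    (x, ny)

-- ===== PORT B =====
-- line.lstrip(" ") / line.rstrip(" ") strip ONLY spaces, ported exactly as
-- dropWhile (· == ' ') from the front resp. (via reverse) from the back;
-- idxs[k] is pyGet? (none = IndexError, only reachable outside Pre_wrap_flat).
def wrap_flat_alt (board : List String) (x : Int) (y : Int) (facing : Int) : Int × Int :=
  if facing = 0 ∨ facing = 2 then
    let line := ((PySem.List.pyGet? board y).getD "").toList
    let idxs := PySem.List.pyRange 0 (line.length : Int) 1
    let k : Int :=
      if facing = 0 then (line.length : Int) - ((line.dropWhile (· == ' ')).length : Int)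
      else (((line.reverse.dropWhile (· == ' ')).reverse.length : Int)) - 1
    ((PySem.List.pyGet? idxs k).getD 0, y)
  else
    let idxs := (PySem.List.enumerate board).filterMap
        (fun p => if x < PySem.Str.len p.2 then some p.1 else none)
    let line := idxs.map (fun i => (PySem.Str.pyGet? ((PySem.List.pyGet? board i).getD "") x).getD ' ')
    let k : Int :=
      if facing = 1 then (line.length : Int) - ((line.dropWhile (· == ' ')).length : Int)
      else (((line.reverse.dropWhile (· == ' ')).reverse.length : Int)) - 1
    (x, (PySem.List.pyGet? idxs k).getD 0)

-- ===== PRECONDITION & SPEC =====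
-- Pre_ excludes exactly the inputs on which Python A raises: a y outside the board or an
-- all-space row for horizontal facings (IndexError / StopIteration / ValueError), no open
-- cell in the column for vertical facings, and — conservatively for facing 1 — vertical
-- scans with a negative x that some row is too short to index (IndexError during the scan;
-- for facing 1 A may return before reaching such a row, which Pre_ also excludes).
def Pre_wrap_flat (board : List String) (x : Int) (y : Int) (facing : Int) : Prop :=
  if facing = 0 ∨ facing = 2 then
    PySem.Raise.InRange board.length y ∧
      ((PySem.List.pyGet? board y).getD "").toList.any (fun c => c != ' ') = true
  else
    (x < 0 → board.all (fun s => decide (-x ≤ PySem.Str.len s)) = true) ∧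
      board.any (fun s =>
        decide (x < PySem.Str.len s) && ((PySem.Str.pyGet? s x).getD ' ' != ' ')) = true
instance (board : List String) (x : Int) (y : Int) (facing : Int) : Decidable (Pre_wrap_flat board x y facing) := by unfold Pre_wrap_flat; infer_instance

def pvWitness_wrap_flat : List String × Int × Int × Int := (["#"], 0, 0, 0)

def Spec_wrap_flat (board : List String) (x : Int) (y : Int) (facing : Int) (out : Int × Int) : Prop := out = wrap_flat_alt board x y facing
instance (board : List String) (x : Int) (y : Int) (facing : Int) (out : Int × Int) : Decidable (Spec_wrap_flat board x y facing out) := by unfold Spec_wrap_flat; infer_instance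

-- ===== CLAIM (what is proved, stated in full; the proofs are below) =====
def Claim_equal_wrap_flat : Prop := ∀ (board : List String) (x : Int) (y : Int) (facing : Int), Dom_wrap_flat board x y facing → Pre_wrap_flat board x y facing → Spec_wrap_flat board x y facing (wrap_flat board x y facing)

-- ===== LEMMAS AND PROOFS =====

-- running max over elements all below a stays below a
lemma foldl_max_lt {a x : Int} {t : List Int} (hx : x < a) (ht : ∀ b ∈ t, b < a) :
    t.foldl max x < a := by
  induction t generalizing x with
  | nil => simpa using hx
  | cons b t ih =>
      simp only [List.foldl_cons]
      exact ih (max_lt hx (ht b (by simp))) (fun c hc => ht c (by simp [hc]))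

-- Python max() of a list whose elements are all below the appended one
lemma max?_append_singleton {xs : List Int} {a : Int} (h : ∀ b ∈ xs, b < a) :
    PySem.List.max? (xs ++ [a]) (fun i => i) = some a := by
  cases xs with
  | nil => simp [PySem.List.max?_id_cons]
  | cons x t =>
      rw [List.cons_append, PySem.List.max?_id_cons, List.foldl_append]
      simp only [List.foldl_cons, List.foldl_nil]
      have hlt : t.foldl max x < a :=
        foldl_max_lt (h x (by simp)) (fun b hb => h b (by simp [hb]))
      simp [max_eq_right hlt.le]

-- A's max() over the matching indices of a firsts-increasing list equals
-- the last-match accumulator over that list.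
lemma max?_filter_eq_foldl (l : List (Int × Char))
    (hl : l.Pairwise (fun p q => p.1 < q.1)) :
    PySem.List.max? ((l.filter (fun p => p.2 != ' ')).map (·.1)) (fun i => i)
      = l.foldl (fun acc p => if p.2 != ' ' then some p.1 else acc) none := by
  induction l using List.reverseRecOn with
  | nil => simp [PySem.List.max?_eq_none_iff]
  | append_singleton l p ih =>
      have hpair := (List.pairwise_append.mp hl)
      have hIH := ih hpair.1
      have hbelow : ∀ q ∈ l, q.1 < p.1 := fun q hq => hpair.2.2 q hq p (by simp)
      rw [List.foldl_append, List.foldl_cons, List.foldl_nil, List.filter_append]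
      by_cases hp : (p.2 != ' ') = true
      · rw [if_pos hp]
        simp only [List.filter_cons, hp, List.filter_nil, List.map_append]
        exact max?_append_singleton (fun b hb => by
          obtain ⟨q, hq, rfl⟩ := List.mem_map.mp hb
          exact hbelow q (List.mem_of_mem_filter hq))
      · rw [if_neg hp]
        simpa [hp] using hIH

-- finding the first open cell of the column equals A's guarded scan of the rows
lemma find_filterMap_eq (x : Int) (l : List (Int × String)) :
    ((l.filterMap (fun p =>
        if x < PySem.Str.len p.2 then some (p.1, (PySem.Str.pyGet? p.2 x).getD ' ') else none)).find?
        (fun c => c.2 != ' ')).map (·.1)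
      = ((l.find? (fun p =>
          decide (x < PySem.Str.len p.2) && ((PySem.Str.pyGet? p.2 x).getD ' ' != ' '))).map (·.1)) := by
  induction l with
  | nil => simp
  | cons p l ih =>
      by_cases h1 : x < PySem.Str.len p.2
      · rw [List.filterMap_cons_some (by rw [if_pos h1])]
        by_cases hb : ((PySem.Str.pyGet? p.2 x).getD ' ' != ' ') = true
        · rw [List.find?_cons_of_pos (p := fun c => c.2 != ' ')
              (a := (p.1, (PySem.Str.pyGet? p.2 x).getD ' ')) hb,
            List.find?_cons_of_pos (a := p)
              (by simp only [Bool.and_eq_true, decide_eq_true_eq, bne_iff_ne]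
                  exact ⟨by simpa using h1, by simpa using hb⟩)]
          rfl
        · rw [List.find?_cons_of_neg (p := fun c => c.2 != ' ')
              (a := (p.1, (PySem.Str.pyGet? p.2 x).getD ' ')) hb,
            List.find?_cons_of_neg (a := p)
              (fun h => hb ((Bool.and_eq_true _ _).mp h).2), ih]
      · rw [List.filterMap_cons_none (by rw [if_neg h1]),
          List.find?_cons_of_neg (a := p)
            (fun h => h1 (of_decide_eq_true ((Bool.and_eq_true _ _).mp h).1)), ih]

-- the matching indices of the column cells are the indices of A's filtered row scan
lemma filter_filterMap_map_fst (x : Int) (l : List (Int × String)) :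
    (((l.filterMap (fun p =>
        if x < PySem.Str.len p.2 then some (p.1, (PySem.Str.pyGet? p.2 x).getD ' ') else none)).filter
        (fun c => c.2 != ' ')).map (·.1))
      = ((l.filter (fun p =>
          decide (x < PySem.Str.len p.2) && ((PySem.Str.pyGet? p.2 x).getD ' ' != ' '))).map (·.1)) := by
  induction l with
  | nil => simp
  | cons p l ih =>
      by_cases h1 : x < PySem.Str.len p.2
      · rw [List.filterMap_cons_some (by rw [if_pos h1])]
        by_cases hb : ((PySem.Str.pyGet? p.2 x).getD ' ' != ' ') = true
        · rw [List.filter_cons, List.filter_cons, if_pos hb,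
            if_pos (show (decide (x < PySem.Str.len p.2)
                && ((PySem.Str.pyGet? p.2 x).getD ' ' != ' ')) = true by
              rw [decide_eq_true h1, hb]; rfl),
            List.map_cons, List.map_cons, ih]
        · rw [List.filter_cons, List.filter_cons, if_neg hb,
            if_neg (fun h => hb ((Bool.and_eq_true _ _).mp h).2), ih]
      · rw [List.filterMap_cons_none (by rw [if_neg h1]), List.filter_cons,
          if_neg (fun h => h1 (of_decide_eq_true ((Bool.and_eq_true _ _).mp h).1)), ih]

-- firsts of the column cells are strictly increasing
lemma pairwise_filterMap_cells (x : Int) (board : List String) :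
    ((PySem.List.enumerate board).filterMap (fun p =>
        if x < PySem.Str.len p.2 then some (p.1, (PySem.Str.pyGet? p.2 x).getD ' ') else none)).Pairwise
      (fun p q => p.1 < q.1) := by
  rw [List.pairwise_filterMap]
  refine (PySem.List.pairwise_lt_enumerate board 0).imp_of_mem ?_
  intro a b _ _ hab c hc d hd
  split_ifs at hc hd with h1 h2
  · cases hc; cases hd; simpa using hab

-- B's lstrip offset, applied to the index list, is the first-match index
lemma pyGet_lstrip_eq_find (cells : List (Int × Char))
    (h : (cells.map (·.2)).any (fun c => c != ' ') = true) :
    PySem.List.pyGet? (cells.map (·.1))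
        (((cells.map (·.2)).length : Int) - (((cells.map (·.2)).dropWhile (· == ' ')).length : Int))
      = (cells.find? (fun p => p.2 != ' ')).map (·.1) := by
  induction cells with
  | nil => simp at h
  | cons p t ih =>
      obtain ⟨i, c⟩ := p
      simp only [List.map_cons] at h ⊢
      by_cases hc : (c != ' ') = true
      · have hc' : (c == ' ') = false := by simpa using hc
        rw [List.dropWhile_cons, if_neg (by simp [hc'])]
        rw [show ((c :: t.map (·.2)).length : Int) - ((c :: t.map (·.2)).length : Int) = 0 by omega]
        rw [List.find?_cons_of_pos (p := fun p => p.2 != ' ') (a := (i, c)) hc,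
          PySem.List.pyGet?_zero_cons]
        rfl
      · have hc' : (c == ' ') = true := by simpa using hc
        rw [List.dropWhile_cons, if_pos (by simp [hc'])]
        have ht : (t.map (·.2)).any (fun c => c != ' ') = true := by
          simpa [hc] using h
        have hd : ((t.map (·.2)).dropWhile (· == ' ')).length ≤ (t.map (·.2)).length :=
          List.length_dropWhile_le _ _
        rw [show ((c :: t.map (·.2)).length : Int)
              - (((t.map (·.2)).dropWhile (· == ' ')).length : Int)
            = (((t.map (·.2)).length - ((t.map (·.2)).dropWhile (· == ' ')).length : Nat) : Int) + 1 by
          simp only [List.length_cons]; omega]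
        rw [PySem.List.pyGet?_cons_succ,
          show (((t.map (·.2)).length - ((t.map (·.2)).dropWhile (· == ' ')).length : Nat) : Int)
            = ((t.map (·.2)).length : Int) - (((t.map (·.2)).dropWhile (· == ' ')).length : Int) by omega,
          ih ht, List.find?_cons_of_neg (p := fun p => p.2 != ' ') (a := (i, c)) hc]

-- B's rstrip offset, applied to the index list, is the last-match accumulator
lemma pyGet_rstrip_eq_foldl (cells : List (Int × Char))
    (h : (cells.map (·.2)).any (fun c => c != ' ') = true) :
    PySem.List.pyGet? (cells.map (·.1))
        ((((cells.map (·.2)).reverse.dropWhile (· == ' ')).reverse.length : Int) - 1)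
      = cells.foldl (fun acc p => if p.2 != ' ' then some p.1 else acc) none := by
  induction cells using List.reverseRecOn with
  | nil => simp at h
  | append_singleton l p ih =>
      obtain ⟨i, c⟩ := p
      simp only [List.map_append, List.map_cons, List.map_nil, List.reverse_append,
        List.reverse_cons, List.reverse_nil, List.nil_append, List.cons_append,
        List.foldl_append, List.foldl_cons, List.foldl_nil] at h ⊢
      by_cases hc : (c != ' ') = true
      · have hc' : (c == ' ') = false := by simpa using hc
        rw [List.dropWhile_cons, if_neg (by simp [hc']), if_pos hc]
        rw [show (((c :: (l.map (·.2)).reverse).reverse.length : Int)) - 1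
            = (((l.map (·.1)).length : Int)) by
          simp only [List.length_reverse, List.length_cons, List.length_map]; omega]
        rw [show (l.map (·.1)) ++ [i] = (l.map (·.1)) ++ i :: [] from rfl,
          PySem.List.pyGet?_append_length]
      · have hc' : (c == ' ') = true := by simpa using hc
        rw [List.dropWhile_cons, if_pos (by simp [hc']), if_neg hc]
        have hl : (l.map (·.2)).any (fun c => c != ' ') = true := by
          simpa [hc] using h
        set r := ((l.map (·.2)).reverse.dropWhile (· == ' ')).length with hr
        have hne : (l.map (·.2)).reverse.dropWhile (· == ' ') ≠ [] := by
          intro hnil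
          obtain ⟨a, ha, ha'⟩ := List.any_eq_true.mp hl
          have := (List.dropWhile_eq_nil_iff.mp hnil) a (List.mem_reverse.mpr ha)
          simp only [beq_iff_eq] at this
          simp [this] at ha'
        have hr1 : 1 ≤ r := by
          cases hEq : (l.map (·.2)).reverse.dropWhile (· == ' ') with
          | nil => exact absurd hEq hne
          | cons a t => simp [hr, hEq]
        have hrle : r ≤ l.length := by
          have := List.length_dropWhile_le (fun c => c == ' ') (l.map (·.2)).reverse
          simpa [hr] using this
        have hIH := ih hl
        rw [show ((((l.map (·.2)).reverse.dropWhile (· == ' ')).reverse.length : Int)) - 1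
            = ((r - 1 : Nat) : Int) by simp [hr]; omega] at hIH ⊢
        rw [PySem.List.pyGet?_natCast] at hIH ⊢
        rw [List.getElem?_append_left (by simp; omega), hIH]

-- the vertical index list is the firsts of the column cells
lemma idxs_eq_map_fst (x : Int) (l : List (Int × String)) :
    l.filterMap (fun p => if x < PySem.Str.len p.2 then some p.1 else none)
      = (l.filterMap (fun p =>
          if x < PySem.Str.len p.2 then some (p.1, (PySem.Str.pyGet? p.2 x).getD ' ') else none)).map (·.1) := by
  induction l with
  | nil => simp
  | cons p l ih =>
      by_cases h1 : x < PySem.Str.len p.2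
      · rw [List.filterMap_cons_some (by rw [if_pos h1]),
          List.filterMap_cons_some (by rw [if_pos h1]), List.map_cons, ih]
      · rw [List.filterMap_cons_none (by rw [if_neg h1]),
          List.filterMap_cons_none (by rw [if_neg h1]), ih]

-- re-reading board[i] along the vertical index list yields the column cells' chars
lemma line_eq_map_snd (board : List String) (x : Int) (l : List (Int × String))
    (hl : ∀ p ∈ l, PySem.List.pyGet? board p.1 = some p.2) :
    (l.filterMap (fun p => if x < PySem.Str.len p.2 then some p.1 else none)).map
        (fun i => (PySem.Str.pyGet? ((PySem.List.pyGet? board i).getD "") x).getD ' ')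
      = (l.filterMap (fun p =>
          if x < PySem.Str.len p.2 then some (p.1, (PySem.Str.pyGet? p.2 x).getD ' ') else none)).map (·.2) := by
  induction l with
  | nil => simp
  | cons p l ih =>
      have hp := hl p (by simp)
      have hl' : ∀ q ∈ l, PySem.List.pyGet? board q.1 = some q.2 :=
        fun q hq => hl q (by simp [hq])
      by_cases h1 : x < PySem.Str.len p.2
      · rw [List.filterMap_cons_some (by rw [if_pos h1]),
          List.filterMap_cons_some (by rw [if_pos h1]), List.map_cons, List.map_cons,
          ih hl', hp]
        simp
      · rw [List.filterMap_cons_none (by rw [if_neg h1]),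
          List.filterMap_cons_none (by rw [if_neg h1]), ih hl']

-- every enumerated pair re-reads to its own row
lemma enumerate_pyGet (board : List String) :
    ∀ p ∈ PySem.List.enumerate board, PySem.List.pyGet? board p.1 = some p.2 := by
  intro p hp
  obtain ⟨k, hk, rfl⟩ := (PySem.List.mem_enumerate_iff _ _ _).mp hp
  simp [hk]

-- the column has an open cell iff A's guarded row scan finds one
lemma any_snd_filterMap (x : Int) (l : List (Int × String)) :
    ((l.filterMap (fun p =>
        if x < PySem.Str.len p.2 then some (p.1, (PySem.Str.pyGet? p.2 x).getD ' ') else none)).map (·.2)).any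
        (fun c => c != ' ')
      = l.any (fun p =>
          decide (x < PySem.Str.len p.2) && ((PySem.Str.pyGet? p.2 x).getD ' ' != ' ')) := by
  induction l with
  | nil => simp
  | cons p l ih =>
      by_cases h1 : x < PySem.Str.len p.2
      · rw [List.filterMap_cons_some (by rw [if_pos h1]), List.map_cons, List.any_cons, ih,
          List.any_cons, decide_eq_true h1, Bool.true_and]
      · rw [List.filterMap_cons_none (by rw [if_neg h1]), ih, List.any_cons,
          decide_eq_false h1, Bool.false_and, Bool.false_or]

-- scanning an enumeration with a predicate on the element only
lemma any_enumerate_snd {A : Type} (l : List A) (f : A → Bool) :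
    (PySem.List.enumerate l).any (fun p => f p.2) = l.any f := by
  conv_rhs => rw [← PySem.List.map_snd_enumerate l 0]
  rw [List.any_map]; rfl

-- ===== VERDICT (by name: the statement is the Claim_ definition above) =====
theorem wrap_flat_spec : Claim_equal_wrap_flat := by
  intro board x y facing _ hpre
  unfold Spec_wrap_flat wrap_flat wrap_flat_alt
  unfold Pre_wrap_flat at hpre
  by_cases h0 : facing = 0
  · subst h0
    simp only [true_or, if_true] at hpre ⊢
    obtain ⟨-, hany⟩ := hpre
    set line := ((PySem.List.pyGet? board y).getD "").toList with hline
    have hcells : line = (PySem.List.enumerate line).map (·.2) :=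
      (PySem.List.map_snd_enumerate line 0).symm
    have hfst : PySem.List.pyRange 0 (line.length : Int) 1
        = (PySem.List.enumerate line).map (·.1) := by
      rw [PySem.List.map_fst_enumerate]; norm_num
    refine congrArg (fun o => (Option.getD o 0, y)) ?_
    rw [hfst]
    rw [show ((line.length : Int) - ((line.dropWhile (· == ' ')).length : Int))
        = (((PySem.List.enumerate line).map (·.2)).length : Int)
          - ((((PySem.List.enumerate line).map (·.2)).dropWhile (· == ' ')).length : Int) by
      rw [← hcells]]
    rw [pyGet_lstrip_eq_find _ (by rw [← hcells]; exact hany)]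
  · by_cases h2 : facing = 2
    · subst h2
      simp only [show ((2:Int) = 0) = False from eq_false (by decide),
        show ((2:Int) = 1) = False from eq_false (by decide),
        false_or, if_true, if_false] at hpre ⊢
      obtain ⟨-, hany⟩ := hpre
      set line := ((PySem.List.pyGet? board y).getD "").toList with hline
      have hcells : line = (PySem.List.enumerate line).map (·.2) :=
        (PySem.List.map_snd_enumerate line 0).symm
      have hfst : PySem.List.pyRange 0 (line.length : Int) 1
          = (PySem.List.enumerate line).map (·.1) := by
        rw [PySem.List.map_fst_enumerate]; norm_num
      refine congrArg (fun o => (Option.getD o 0, y)) ?_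
      rw [max?_filter_eq_foldl _ (PySem.List.pairwise_lt_enumerate _ 0), hfst]
      rw [show (((line.reverse.dropWhile (· == ' ')).reverse.length : Int) - 1)
          = (((((PySem.List.enumerate line).map (·.2)).reverse.dropWhile (· == ' ')).reverse.length : Int)) - 1 by
        rw [← hcells]]
      rw [pyGet_rstrip_eq_foldl _ (by rw [← hcells]; exact hany)]
    · by_cases h1 : facing = 1
      · subst h1
        simp only [show ((1:Int) = 0) = False from eq_false (by decide),
          show ((1:Int) = 2) = False from eq_false (by decide),
          or_false, if_true] at hpre ⊢
        obtain ⟨-, hany⟩ := hpre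
        have hget := enumerate_pyGet board
        have hanyC : (((PySem.List.enumerate board).filterMap (fun p =>
            if x < PySem.Str.len p.2 then some (p.1, (PySem.Str.pyGet? p.2 x).getD ' ') else none)).map (·.2)).any
            (fun c => c != ' ') = true := by
          rw [any_snd_filterMap]
          rw [any_enumerate_snd board (fun s =>
            decide (x < PySem.Str.len s) && ((PySem.Str.pyGet? s x).getD ' ' != ' '))]
          exact hany
        refine congrArg (fun o => (x, Option.getD o 0)) ?_
        rw [← find_filterMap_eq]
        rw [line_eq_map_snd board x _ hget, idxs_eq_map_fst,
          pyGet_lstrip_eq_find _ hanyC]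
      · simp only [show (facing = 0) = False from eq_false h0,
          show (facing = 2) = False from eq_false h2,
          show (facing = 1) = False from eq_false h1,
          false_or, if_false] at hpre ⊢
        obtain ⟨-, hany⟩ := hpre
        have hget := enumerate_pyGet board
        have hanyC : (((PySem.List.enumerate board).filterMap (fun p =>
            if x < PySem.Str.len p.2 then some (p.1, (PySem.Str.pyGet? p.2 x).getD ' ') else none)).map (·.2)).any
            (fun c => c != ' ') = true := by
          rw [any_snd_filterMap]
          rw [any_enumerate_snd board (fun s =>
            decide (x < PySem.Str.len s) && ((PySem.Str.pyGet? s x).getD ' ' != ' '))]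
          exact hany
        refine congrArg (fun o => (x, Option.getD o 0)) ?_
        rw [← filter_filterMap_map_fst x (PySem.List.enumerate board),
          max?_filter_eq_foldl _ (pairwise_filterMap_cells x board)]
        rw [line_eq_map_snd board x _ hget, idxs_eq_map_fst,
          pyGet_rstrip_eq_foldl _ hanyC]
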